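-- pv_equiv track=rewrite | github.com/Amathlog/AdventOfCode | everybody_codes/2024/Quest1/solution.py | vague
-- ===== SOURCE A (Python) =====
-- potions = {'A': 0, 'B': 1, 'C': 3, 'D': 5, 'x': 0}
--
-- def is_enemy(c: str) -> bool:
--     return c != 'x'
--
-- def vague(entry: str, nb_enemies_max: int) -> int:
--     count = 0
--     for i in range(len(entry) // nb_enemies_max):
--         nb_enemies = 0
--         for j in range(nb_enemies_max):
--             enemy = entry[i * nb_enemies_max + j]
--             nb_enemies += int(is_enemy(enemy))
--             count += potions[enemy]
--
--         if nb_enemies == 2: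
--             count += 2
--         elif nb_enemies == 3:
--             count += 6
--
--     return count
-- ===== SOURCE B (Python) =====
-- potions = {'A': 0, 'B': 1, 'C': 3, 'D': 5, 'x': 0}
--
-- def vague(entry: str, nb_enemies_max: int) -> int:
--     q = max(len(entry) // nb_enemies_max, 0)
--     n = q * nb_enemies_max
--     prefix = entry[:n]
--     # potion cost: the alphabet is fixed, so it is a weighted character count
--     total = prefix.count('B') + 3 * prefix.count('C') + 5 * prefix.count('D')
--     # bonuses: histogram of 'x' per group, bucketed by position // group size
--     xs = [0] * q
--     for i, c in enumerate(prefix):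
--         if c == 'x':
--             xs[i // nb_enemies_max] += 1
--     for xcnt in xs:
--         e = nb_enemies_max - xcnt
--         if e == 2:
--             total += 2
--         elif e == 3:
--             total += 6
--     return total
-- ===== Notes on version B (the rewrite author's own statement) =====
-- stated objective: alternative
-- what changed: B drops the per-group scan and the per-character dict lookup entirely: the potion cost becomes a weighted character count (count('B') + 3*count('C') + 5*count('D') over the processed prefix) and the group bonuses come from a histogram of 'x' occurrences bucketed by position // group size, instead of A's nested index loops with a running enemy counter per group.
-- outside the precondition, e.g. on vague('Qx', 2): A raises KeyError, B returns 0; on vague('AB', 0): A raises ZeroDivisionError, B raises ZeroDivisionError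
import Mathlib
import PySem

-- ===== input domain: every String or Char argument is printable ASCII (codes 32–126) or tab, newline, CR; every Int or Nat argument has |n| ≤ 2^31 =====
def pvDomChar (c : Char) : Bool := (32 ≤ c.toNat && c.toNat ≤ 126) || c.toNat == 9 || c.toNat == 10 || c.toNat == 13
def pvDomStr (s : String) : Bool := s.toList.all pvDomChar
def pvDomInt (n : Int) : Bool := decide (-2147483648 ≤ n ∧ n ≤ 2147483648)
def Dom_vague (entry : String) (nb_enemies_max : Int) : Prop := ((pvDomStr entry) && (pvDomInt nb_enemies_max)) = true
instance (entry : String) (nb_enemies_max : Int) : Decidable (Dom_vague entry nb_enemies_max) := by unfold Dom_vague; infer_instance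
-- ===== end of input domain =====

-- B computes the potion cost as a weighted character count (count of 'B','C','D') and the
-- group bonuses from a histogram of 'x' per group bucketed by position // group size;
-- objective: alternative (no per-group scan, no per-character dict lookup).


-- ===== PORT A =====
def potionsD : PySem.Dict Char Int :=
  PySem.Dict.ofList [('A', 0), ('B', 1), ('C', 3), ('D', 5), ('x', 0)]

def isEnemy (c : Char) : Bool := c ≠ 'x'

-- entry[i*k+j] (IndexError) and potions[enemy] (KeyError) can raise in Python; the total
-- forms pyGetD/getD are exact on Pre_vague, which excludes exactly those inputs.
def vague (entry : String) (nb_enemies_max : Int) : Int :=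
  let cs := entry.toList
  (PySem.List.pyRange 0 (PySem.Int.floordiv (cs.length : Int) nb_enemies_max) 1).foldl
    (fun count i =>
      let st := (PySem.List.pyRange 0 nb_enemies_max 1).foldl
        (fun (st : Int × Int) j =>
          let enemy := PySem.List.pyGetD cs (i * nb_enemies_max + j) ' '
          (st.1 + (if isEnemy enemy then 1 else 0), st.2 + PySem.Dict.getD potionsD enemy 0))
        (0, count)
      if st.1 = 2 then st.2 + 2 else if st.1 = 3 then st.2 + 6 else st.2)
    0

-- ===== PORT B =====
def vague_alt (entry : String) (nb_enemies_max : Int) : Int :=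
  let cs := entry.toList
  let q := max (PySem.Int.floordiv (cs.length : Int) nb_enemies_max) 0
  let n := q * nb_enemies_max
  let pre := PySem.List.slice cs none (some n)
  let total : Int := (PySem.List.count pre 'B' : Int)
    + 3 * (PySem.List.count pre 'C' : Int) + 5 * (PySem.List.count pre 'D' : Int)
  let xs0 : List Int := List.replicate q.toNat 0   -- [0] * q  (q ≥ 0 by construction)
  let xs := (PySem.List.enumerate pre 0).foldl
    (fun xs ic =>
      if ic.2 = 'x' then
        -- xs[i // k] += 1 ; the bucket i // k is always < q, so the total forms are exact
        PySem.List.pySetD xs (PySem.Int.floordiv ic.1 nb_enemies_max)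
          (PySem.List.pyGetD xs (PySem.Int.floordiv ic.1 nb_enemies_max) 0 + 1)
      else xs) xs0
  xs.foldl (fun tot xcnt =>
      let e := nb_enemies_max - xcnt
      if e = 2 then tot + 2 else if e = 3 then tot + 6 else tot) total

-- ===== PRECONDITION & SPEC =====
-- Pre_ excludes exactly the inputs on which Python A raises: nb_enemies_max = 0
-- (ZeroDivisionError) and a processed character outside 'ABCDx' (KeyError).
def Pre_vague (entry : String) (nb_enemies_max : Int) : Prop :=
  nb_enemies_max ≠ 0 ∧
  (0 < nb_enemies_max →
    ((entry.toList.take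
        ((entry.toList.length / nb_enemies_max.toNat) * nb_enemies_max.toNat)).all
      (fun c => c == 'A' || c == 'B' || c == 'C' || c == 'D' || c == 'x')) = true)

instance (entry : String) (nb_enemies_max : Int) : Decidable (Pre_vague entry nb_enemies_max) := by
  unfold Pre_vague; infer_instance

def pvWitness_vague : String × Int := (String.ofList ['x', 'B', 'x'], 3)

def Spec_vague (entry : String) (nb_enemies_max : Int) (out : Int) : Prop := out = vague_alt entry nb_enemies_max
instance (entry : String) (nb_enemies_max : Int) (out : Int) : Decidable (Spec_vague entry nb_enemies_max out) := by unfold Spec_vague; infer_instance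

-- ===== CLAIM (what is proved, stated in full; the proofs are below) =====
def Claim_equal_vague : Prop := ∀ (entry : String) (nb_enemies_max : Int), Dom_vague entry nb_enemies_max → Pre_vague entry nb_enemies_max → Spec_vague entry nb_enemies_max (vague entry nb_enemies_max)

-- ===== LEMMAS AND PROOFS =====

-- potion value of one character (the total-form lookup A's port uses)
def pv (c : Char) : Int := PySem.Dict.getD potionsD c 0

-- the m-th group of kn consecutive characters
def chunk (cs : List Char) (kn m : Nat) : List Char := (cs.drop (m * kn)).take kn

def psum (xs : List Char) : Int := (xs.map pv).sum

def ecnt (xs : List Char) : Int := (xs.map (fun c => if isEnemy c then (1 : Int) else 0)).sum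

def bonus (e : Int) : Int := if e = 2 then 2 else if e = 3 then 6 else 0

def bsum (cs : List Char) (kn : Nat) : Nat → Int
  | 0 => 0
  | m + 1 => bsum cs kn m + bonus (ecnt (chunk cs kn m))

lemma innerA (cs : List Char) (t : Nat) (b : Int) (hb : 0 ≤ b)
    (h : b.toNat + t ≤ cs.length) (a0 c0 : Int) :
    (PySem.List.pyRange 0 (t : Int) 1).foldl
      (fun (st : Int × Int) j =>
        (st.1 + (if isEnemy (PySem.List.pyGetD cs (b + j) ' ') then 1 else 0),
         st.2 + PySem.Dict.getD potionsD (PySem.List.pyGetD cs (b + j) ' ') 0))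
      (a0, c0)
    = (a0 + ecnt ((cs.drop b.toNat).take t), c0 + psum ((cs.drop b.toNat).take t)) := by
  induction t with
  | zero => simp [PySem.List.pyRange_one_eq_nil, ecnt, psum]
  | succ t ih =>
    rw [show ((t + 1 : Nat) : Int) = (t : Int) + 1 by push_cast; ring,
      PySem.List.pyRange_one_succ_right (by positivity), List.foldl_append,
      ih (by omega)]
    have hlt : b.toNat + t < cs.length := by omega
    have hget : PySem.List.pyGetD cs (b + (t : Int)) ' ' = cs[b.toNat + t] := by
      rw [show b + (t : Int) = ((b.toNat + t : Nat) : Int) by omega,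
        PySem.List.pyGetD_natCast]
      exact List.getD_eq_getElem cs ' ' hlt
    have htake : (cs.drop b.toNat).take (t + 1) = (cs.drop b.toNat).take t ++ [cs[b.toNat + t]] := by
      rw [List.take_add_one]
      congr
      rw [List.getElem?_drop]
      simp [hlt]
    simp [hget, htake, ecnt, psum, pv]
    constructor <;> ring

lemma outerA (cs : List Char) (kn : Nat) (m : Nat)
    (h : m * kn ≤ cs.length) (init : Int) :
    (PySem.List.pyRange 0 (m : Int) 1).foldl
      (fun count i =>
        if ((PySem.List.pyRange 0 (kn : Int) 1).foldl
          (fun (st : Int × Int) j =>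
            (st.1 + (if isEnemy (PySem.List.pyGetD cs (i * (kn : Int) + j) ' ') then 1 else 0),
             st.2 + PySem.Dict.getD potionsD (PySem.List.pyGetD cs (i * (kn : Int) + j) ' ') 0))
          (0, count)).1 = 2 then ((PySem.List.pyRange 0 (kn : Int) 1).foldl
          (fun (st : Int × Int) j =>
            (st.1 + (if isEnemy (PySem.List.pyGetD cs (i * (kn : Int) + j) ' ') then 1 else 0),
             st.2 + PySem.Dict.getD potionsD (PySem.List.pyGetD cs (i * (kn : Int) + j) ' ') 0))
          (0, count)).2 + 2
        else if ((PySem.List.pyRange 0 (kn : Int) 1).foldl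
          (fun (st : Int × Int) j =>
            (st.1 + (if isEnemy (PySem.List.pyGetD cs (i * (kn : Int) + j) ' ') then 1 else 0),
             st.2 + PySem.Dict.getD potionsD (PySem.List.pyGetD cs (i * (kn : Int) + j) ' ') 0))
          (0, count)).1 = 3 then ((PySem.List.pyRange 0 (kn : Int) 1).foldl
          (fun (st : Int × Int) j =>
            (st.1 + (if isEnemy (PySem.List.pyGetD cs (i * (kn : Int) + j) ' ') then 1 else 0),
             st.2 + PySem.Dict.getD potionsD (PySem.List.pyGetD cs (i * (kn : Int) + j) ' ') 0))
          (0, count)).2 + 6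
        else ((PySem.List.pyRange 0 (kn : Int) 1).foldl
          (fun (st : Int × Int) j =>
            (st.1 + (if isEnemy (PySem.List.pyGetD cs (i * (kn : Int) + j) ' ') then 1 else 0),
             st.2 + PySem.Dict.getD potionsD (PySem.List.pyGetD cs (i * (kn : Int) + j) ' ') 0))
          (0, count)).2)
      init
    = init + psum (cs.take (m * kn)) + bsum cs kn m := by
  induction m with
  | zero => simp [PySem.List.pyRange_one_eq_nil, psum, bsum]
  | succ m ih =>
    have h' : m * kn + kn ≤ cs.length := by rw [Nat.succ_mul] at h; exact h
    rw [show ((m + 1 : Nat) : Int) = (m : Int) + 1 by push_cast; ring,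
      PySem.List.pyRange_one_succ_right (by positivity), List.foldl_append,
      ih (by omega)]
    simp only [List.foldl_cons, List.foldl_nil]
    have hidx : ∀ j : Int, (m : Int) * (kn : Int) + j = ((m * kn : Nat) : Int) + j := by
      intro j; push_cast; ring
    simp only [hidx]
    rw [innerA cs kn ((m * kn : Nat) : Int) (by positivity) (by simpa using h') 0 _]
    have htake : cs.take ((m + 1) * kn) = cs.take (m * kn) ++ chunk cs kn m := by
      rw [show (m + 1) * kn = m * kn + kn by ring, List.take_add]; rfl
    simp only [Int.toNat_natCast, htake, bsum, psum, chunk, bonus, List.map_append,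
      List.sum_append]
    split_ifs <;> omega

lemma ecnt_eq (g : List Char) : (g.length : Int) - PySem.List.count g 'x' = ecnt g := by
  induction g with
  | nil => simp [ecnt]
  | cons c g ih =>
    simp only [ecnt, List.map_cons, List.sum_cons] at *
    by_cases h : c = 'x' <;>
      simp [PySem.List.count_eq, isEnemy, h] at * <;> omega

-- pv as an explicit table (for characters outside the dict the port's getD default is 0)
lemma pv_eq (c : Char) :
    pv c = if c = 'B' then 1 else if c = 'C' then 3 else if c = 'D' then 5 else 0 := by
  by_cases hA : c = 'A'
  · subst hA; decide
  by_cases hB : c = 'B'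
  · subst hB; decide
  by_cases hC : c = 'C'
  · subst hC; decide
  by_cases hD : c = 'D'
  · subst hD; decide
  by_cases hx : c = 'x'
  · subst hx; decide
  unfold pv potionsD
  simp only [PySem.Dict.ofList, PySem.Dict.getD, PySem.Dict.get?, PySem.Dict.update,
    PySem.Dict.insert, PySem.Dict.contains, PySem.Dict.empty, List.foldl]
  simp [hB, hC, hD, Ne.symm hA, Ne.symm hB, Ne.symm hC, Ne.symm hD, Ne.symm hx]

-- B's weighted character count computes psum
lemma psum_counts (p : List Char) :
    (PySem.List.count p 'B' : Int) + 3 * (PySem.List.count p 'C' : Int)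
      + 5 * (PySem.List.count p 'D' : Int) = psum p := by
  induction p with
  | nil => simp [psum]
  | cons c p ih =>
    simp only [psum, List.map_cons, List.sum_cons, pv_eq c] at *
    by_cases hB : c = 'B'
    · simp [PySem.List.count_eq, hB] at *; omega
    · by_cases hC : c = 'C'
      · simp [PySem.List.count_eq, hC] at *; omega
      · by_cases hD : c = 'D'
        · simp [PySem.List.count_eq, hD] at *; omega
        · simp [PySem.List.count_eq, hB, hC, hD] at *; omega

-- processing one chunk increments exactly bucket m by its 'x'-count
lemma chunkFold (kn : Nat) (hk : 0 < kn) (g : List Char) (m j : Nat) (xs : List Int)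
    (hm : m < xs.length) (hj : j + g.length <= kn) :
    (PySem.List.enumerate g ((m * kn + j : Nat) : Int)).foldl
      (fun xs (ic : Int × Char) =>
        if ic.2 = 'x' then
          PySem.List.pySetD xs (PySem.Int.floordiv ic.1 (kn : Int))
            (PySem.List.pyGetD xs (PySem.Int.floordiv ic.1 (kn : Int)) 0 + 1)
        else xs) xs
    = xs.set m (xs.getD m 0 + PySem.List.count g 'x') := by
  induction g generalizing j xs with
  | nil =>
    simp only [PySem.List.enumerate_nil, List.foldl_nil, PySem.List.count, List.count_nil,
      Nat.cast_zero, add_zero]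
    rw [List.getD_eq_getElem xs 0 hm, List.set_getElem_self]
  | cons c g ih =>
    have hjlt : j < kn := by simp at hj; omega
    have hdiv : PySem.Int.floordiv ((m * kn + j : Nat) : Int) (kn : Int) = (m : Int) := by
      rw [PySem.Int.floordiv_natCast]
      congr 1
      rw [show m * kn + j = j + kn * m by ring, Nat.add_mul_div_left _ _ hk,
        Nat.div_eq_of_lt hjlt]
      omega
    rw [PySem.List.enumerate_cons, List.foldl_cons]
    have hs : ((m * kn + j : Nat) : Int) + 1 = ((m * kn + (j + 1) : Nat) : Int) := by
      push_cast; ring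
    by_cases hc : c = 'x'
    · rw [if_pos hc, hdiv, PySem.List.pyGetD_natCast, PySem.List.pySetD_natCast, hs,
        ih (j + 1) _ (by simpa using hm) (by simp at hj ⊢; omega), List.set_set]
      have hgd : (xs.set m (xs.getD m 0 + 1)).getD m 0 = xs.getD m 0 + 1 := by
        rw [List.getD_eq_getElem _ 0 (by simpa using hm), List.getElem_set_self]
      rw [hgd]
      congr 1
      simp [PySem.List.count_eq, hc]
      ring
    · rw [if_neg hc, hs, ih (j + 1) _ hm (by simp at hj ⊢; omega)]
      simp [PySem.List.count_eq, hc]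

-- after processing the first m chunks the histogram holds their 'x'-counts
lemma bucketsAux (cs : List Char) (kn q : Nat) (hk : 0 < kn) (hq : q * kn <= cs.length) :
    ∀ m, m <= q →
    (PySem.List.enumerate (cs.take (m * kn)) 0).foldl
      (fun xs (ic : Int × Char) =>
        if ic.2 = 'x' then
          PySem.List.pySetD xs (PySem.Int.floordiv ic.1 (kn : Int))
            (PySem.List.pyGetD xs (PySem.Int.floordiv ic.1 (kn : Int)) 0 + 1)
        else xs) (List.replicate q 0)
    = (List.range q).map
        (fun t => if t < m then (PySem.List.count (chunk cs kn t) 'x' : Int) else 0) := by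
  intro m
  induction m with
  | zero =>
    intro _
    simp
  | succ m ih =>
    intro hmq
    have hmk : m * kn + kn <= cs.length := by
      calc m * kn + kn = (m + 1) * kn := by ring
        _ <= q * kn := Nat.mul_le_mul_right _ hmq
        _ <= cs.length := hq
    have htake : cs.take ((m + 1) * kn) = cs.take (m * kn) ++ chunk cs kn m := by
      rw [show (m + 1) * kn = m * kn + kn by ring, List.take_add]; rfl
    have hlen : (cs.take (m * kn)).length = m * kn := by
      rw [List.length_take]; omega
    rw [htake, PySem.List.enumerate_append, List.foldl_append, ih (by omega), hlen]
    have hoff : (0 : Int) + (m * kn : Nat) = ((m * kn + 0 : Nat) : Int) := by push_cast; ring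
    rw [hoff, chunkFold kn hk (chunk cs kn m) m 0 _
      (by simp only [List.length_map, List.length_range]; omega)
      (by simp [chunk])]
    have hgd : ((List.range q).map
        (fun t => if t < m then (PySem.List.count (chunk cs kn t) 'x' : Int) else 0)).getD m 0
        = 0 := by
      rw [List.getD_eq_getElem _ 0 (by simp; omega)]
      simp
    rw [hgd]
    apply List.ext_getElem
    · simp
    · intro i h1 h2
      simp only [List.length_set, List.length_map, List.length_range] at h1 h2
      rw [List.getElem_set]
      by_cases him : m = i
      · subst him
        simp
      · simp only [if_neg him, List.getElem_map, List.getElem_range]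
        by_cases hil : i < m
        · rw [if_pos hil, if_pos (show i < m + 1 by omega)]
        · rw [if_neg hil, if_neg (show ¬ i < m + 1 by omega)]

-- the bonus loop as a sum
lemma foldl_bonus (k : Int) (l : List Int) (t0 : Int) :
    l.foldl (fun tot x =>
        let e := k - x
        if e = 2 then tot + 2 else if e = 3 then tot + 6 else tot) t0
    = t0 + (l.map (fun x => bonus (k - x))).sum := by
  induction l generalizing t0 with
  | nil => simp
  | cons x l ih =>
    simp only [List.foldl_cons, List.map_cons, List.sum_cons, ih, bonus]
    split_ifs <;> ring

-- the summed bonuses over the histogram are A's group bonuses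
lemma bsum_eq (cs : List Char) (kn q : Nat) (hq : q * kn <= cs.length) :
    (((List.range q).map (fun m => (PySem.List.count (chunk cs kn m) 'x' : Int))).map
      (fun x => bonus ((kn : Int) - x))).sum = bsum cs kn q := by
  induction q with
  | zero => simp [bsum]
  | succ q ih =>
    have hmk : q * kn + kn <= cs.length := by
      calc q * kn + kn = (q + 1) * kn := by ring
        _ <= cs.length := hq
    have hclen : (chunk cs kn q).length = kn := by
      simp [chunk]; omega
    rw [List.range_succ, List.map_append, List.map_append, List.sum_append,
      ih (by omega)]
    simp only [List.map_cons, List.map_nil, List.sum_cons, List.sum_nil, add_zero, bsum]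
    rw [show ((kn : Int)) = ((chunk cs kn q).length : Int) by rw [hclen],
      ecnt_eq]


-- ===== VERDICT (by name: the statement is the Claim_ definition above) =====
theorem vague_spec : Claim_equal_vague := by
  intro entry k _hDom hPre
  obtain ⟨hk0, _halpha⟩ := hPre
  unfold Spec_vague
  simp only [vague, vague_alt]
  rcases lt_trichotomy k 0 with hneg | hz | hpos
  · -- negative divisor: both sides process zero groups
    have hq : PySem.Int.floordiv (entry.toList.length : Int) k <= 0 := by
      by_contra hq
      push Not at hq
      have hfm := PySem.Int.floordiv_mul_add_mod (entry.toList.length : Int) k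
      have hmb := PySem.Int.mod_neg_bounds (a := (entry.toList.length : Int)) hneg
      have hlen : (0 : Int) <= (entry.toList.length : Int) := Int.natCast_nonneg _
      nlinarith [hfm, hmb.1, hmb.2, hq, hneg, hlen]
    rw [PySem.List.pyRange_one_eq_nil hq]
    have hmax : max (PySem.Int.floordiv (entry.toList.length : Int) k) 0 = 0 :=
      max_eq_right hq
    rw [hmax]
    simp only [zero_mul, Int.toNat_zero, List.replicate_zero]
    rw [show (0 : Int) = ((0 : Nat) : Int) from rfl, PySem.List.slice_to_natCast]
    simp [PySem.List.count, PySem.List.enumerate_nil]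
  · exact absurd hz hk0
  · -- positive divisor
    have hkk : k = (k.toNat : Int) := (Int.toNat_of_nonneg hpos.le).symm
    have hk : 0 < k.toNat := by omega
    set cs := entry.toList with hcs
    set qn := cs.length / k.toNat with hqn
    have hqlen : qn * k.toNat <= cs.length := Nat.div_mul_le_self _ _
    rw [hkk, PySem.Int.floordiv_natCast]
    rw [outerA cs k.toNat qn hqlen 0]
    have hmax : max ((cs.length / k.toNat : Nat) : Int) 0 = ((qn : Nat) : Int) :=
      max_eq_left (Int.natCast_nonneg _)
    rw [hmax]
    have hn : ((qn : Nat) : Int) * ((k.toNat : Nat) : Int) = ((qn * k.toNat : Nat) : Int) := by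
      push_cast; ring
    rw [hn, PySem.List.slice_to_natCast]
    rw [Int.toNat_natCast]
    rw [bucketsAux cs k.toNat qn hk hqlen qn (le_refl qn)]
    have hmap : (List.range qn).map
        (fun t => if t < qn then (PySem.List.count (chunk cs k.toNat t) 'x' : Int) else 0)
        = (List.range qn).map (fun t => (PySem.List.count (chunk cs k.toNat t) 'x' : Int)) :=
      List.map_congr_left (fun t ht => if_pos (List.mem_range.mp ht))
    rw [hmap, foldl_bonus]
    rw [bsum_eq cs k.toNat qn hqlen]
    rw [psum_counts]
    ring
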